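-- pv_equiv track=rewrite | github.com/robin3795/Python | version_compare.py | getNumInStr
-- ===== SOURCE A (Python) =====
-- def getNumInStr(str):
--     numStr = ""
--     for char in str:
--         if char.isdigit():
--             numStr += char
--     if(numStr != ""):
--         return int(numStr)
--     else:
--         return 0
-- ===== SOURCE B (Python) =====
-- def getNumInStr(str):
--     num = 0
--     for char in str:
--         if char.isdigit():
--             num = num * 10 + (ord(char) - 48)
--     return num
-- ===== Notes on version B (the rewrite author's own statement) =====
-- stated objective: simpler
-- what changed: B keeps a single integer accumulator (num = num*10 + digit) in one pass instead of building an intermediate digit string and parsing it with int(), and drops the emptiness branch (no digits leaves num = 0).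
import Mathlib
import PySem

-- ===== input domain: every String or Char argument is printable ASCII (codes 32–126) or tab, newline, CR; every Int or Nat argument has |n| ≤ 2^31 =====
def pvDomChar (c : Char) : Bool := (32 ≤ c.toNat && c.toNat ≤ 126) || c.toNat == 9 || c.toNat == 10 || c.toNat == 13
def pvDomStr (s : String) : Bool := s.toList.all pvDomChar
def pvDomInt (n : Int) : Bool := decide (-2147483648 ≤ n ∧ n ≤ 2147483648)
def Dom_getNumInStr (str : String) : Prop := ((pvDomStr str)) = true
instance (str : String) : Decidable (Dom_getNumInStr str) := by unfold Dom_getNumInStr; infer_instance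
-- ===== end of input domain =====

-- B replaces A's build-a-digit-string-then-int() with a single integer accumulator pass (simpler; no intermediate string, no emptiness branch).


-- ===== PORT A =====
-- int(numStr) where numStr is all ASCII digits '0'-'9' by construction (every char passed
-- char.isdigit()): on such strings Python's int() is exactly this left fold — hand-ported
-- here because only this all-digit case of int() is ever reached.
def pvIntOfDigits (ds : List Char) : Int :=
  ds.foldl (fun a c => a * 10 + ((c.toNat : Int) - 48)) 0

def getNumInStr (str : String) : Int :=
  -- numStr accumulated left-to-right as in A's `numStr += char`
  let numStr : List Char :=
    str.toList.foldl (fun ns c => if PySem.Chars.isdigit c then ns ++ [c] else ns) []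
  if numStr ≠ [] then pvIntOfDigits numStr else 0

-- ===== PORT B =====
def getNumInStr_alt (str : String) : Int :=
  str.toList.foldl (fun num c => if PySem.Chars.isdigit c then num * 10 + ((c.toNat : Int) - 48) else num) 0

-- ===== PRECONDITION & SPEC =====
-- Pre_ excludes exactly the inputs on which Python A raises: with more than 4300 digit
-- characters, int(numStr) hits CPython's default integer string conversion limit (ValueError).
def Pre_getNumInStr (str : String) : Prop :=
  str.toList.countP (fun c => PySem.Chars.isdigit c) ≤ 4300
instance (str : String) : Decidable (Pre_getNumInStr str) := by unfold Pre_getNumInStr; infer_instance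
def pvWitness_getNumInStr : String := "a1b2c3"

def Spec_getNumInStr (str : String) (out : Int) : Prop := out = getNumInStr_alt str
instance (str : String) (out : Int) : Decidable (Spec_getNumInStr str out) := by unfold Spec_getNumInStr; infer_instance

-- ===== CLAIM (what is proved, stated in full; the proofs are below) =====
def Claim_equal_getNumInStr : Prop := ∀ (str : String), Dom_getNumInStr str → Pre_getNumInStr str → Spec_getNumInStr str (getNumInStr str)

-- ===== LEMMAS AND PROOFS =====

-- Fusion: parsing the digit list collected by A's filtering fold equals B's one-pass fold.
theorem pvFuse (cs : List Char) (ns : List Char) :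
    pvIntOfDigits (cs.foldl (fun ns c => if PySem.Chars.isdigit c then ns ++ [c] else ns) ns)
      = cs.foldl (fun num c => if PySem.Chars.isdigit c then num * 10 + ((c.toNat : Int) - 48) else num)
          (pvIntOfDigits ns) := by
  induction cs generalizing ns with
  | nil => rfl
  | cons c cs ih =>
    simp only [List.foldl_cons]
    by_cases h : PySem.Chars.isdigit c
    · rw [if_pos h, if_pos h, ih, pvIntOfDigits, List.foldl_append]
      rfl
    · rw [if_neg h, if_neg h, ih]

theorem pvIntOfDigits_nil : pvIntOfDigits [] = 0 := rfl

-- ===== VERDICT (by name: the statement is the Claim_ definition above) =====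
theorem getNumInStr_spec : Claim_equal_getNumInStr := by
  intro str _ _
  unfold Spec_getNumInStr getNumInStr getNumInStr_alt
  have hf := pvFuse str.toList []
  rw [pvIntOfDigits_nil] at hf
  by_cases h :
      (str.toList.foldl (fun ns c => if PySem.Chars.isdigit c then ns ++ [c] else ns) ([] : List Char)) = []
  · simp only [h, ne_eq, not_true_eq_false, if_false]
    rw [← hf, h, pvIntOfDigits_nil]
  · simp only [h, ne_eq, not_false_eq_true, if_true]
    exact hf
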